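-- pv_equiv track=rewrite | github.com/jinxiongnan/HLMEA | scripts/training_data_generation.py | select_pos_neg_from_distribution
-- ===== SOURCE A (Python) =====
-- import copy
--
-- def sort_hit_list_fixing_pos_index(hit_list: list, pos_index: int):
--     # Separate the specific item from the list
--     copyed_hit_list = copy.deepcopy(hit_list)
--     pos_value = copyed_hit_list.pop(pos_index)
--
--     # Sort the remaining items in descending order
--     sorted_hit_list = sorted(copyed_hit_list, reverse=True)
--
--     # Insert the specific item back into its original position
--     sorted_hit_list.insert(pos_index, pos_value)
--
--     return sorted_hit_list
--
-- def select_pos_neg_from_distribution(hit_list: list):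
--     # Find the positive element (max value)
--     max_value = max(hit_list)
--     pos_index = hit_list.index(max_value)
--
--     sorted_hit_list = sort_hit_list_fixing_pos_index(hit_list, pos_index)
--     # Find the negative element
--     neg_index = -1
--     for i in range(len(hit_list)):
--         if i != pos_index:
--             cur_value = hit_list[i]
--             golden_value = sorted_hit_list[i]
--             if cur_value != golden_value:
--                 neg_index = i
--                 break
--
--     # If all elements are in correct descending order, select a random one except the positive element
--     if neg_index == -1:
--         for i in range(len(hit_list)):
--             if i != pos_index:
--                 neg_index = i
--                 break
--
--     return pos_index, neg_index
-- ===== SOURCE B (Python) =====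
-- def select_pos_neg_from_distribution(hit_list: list):
--     n = len(hit_list)
--     # first index of the maximum value
--     pos_index = 0
--     for i in range(1, n):
--         if hit_list[i] > hit_list[pos_index]:
--             pos_index = i
--     # one reverse pass: leftmost i != pos_index whose value is smaller than
--     # the maximum of the later values (excluding pos_index)
--     neg_index = -1
--     suffmax = None
--     for i in range(n - 1, -1, -1):
--         if i == pos_index:
--             continue
--         v = hit_list[i]
--         if suffmax is None or v > suffmax:
--             suffmax = v
--         elif v < suffmax:
--             neg_index = i
--     if neg_index == -1 and n > 1:
--         neg_index = 1 if pos_index == 0 else 0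
--     return pos_index, neg_index
-- ===== Notes on version B (the rewrite author's own statement) =====
-- stated objective: faster
-- what changed: B replaces A's deepcopy + descending sort of the remainder + positional comparison by a single reverse pass that tracks the suffix maximum (the first out-of-order element is the leftmost one smaller than some later element), and finds the argmax by one scan instead of max()+index().
-- outside the precondition, e.g. on select_pos_neg_from_distribution([]): A raises ValueError, B returns (0, -1)
import Mathlib
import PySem

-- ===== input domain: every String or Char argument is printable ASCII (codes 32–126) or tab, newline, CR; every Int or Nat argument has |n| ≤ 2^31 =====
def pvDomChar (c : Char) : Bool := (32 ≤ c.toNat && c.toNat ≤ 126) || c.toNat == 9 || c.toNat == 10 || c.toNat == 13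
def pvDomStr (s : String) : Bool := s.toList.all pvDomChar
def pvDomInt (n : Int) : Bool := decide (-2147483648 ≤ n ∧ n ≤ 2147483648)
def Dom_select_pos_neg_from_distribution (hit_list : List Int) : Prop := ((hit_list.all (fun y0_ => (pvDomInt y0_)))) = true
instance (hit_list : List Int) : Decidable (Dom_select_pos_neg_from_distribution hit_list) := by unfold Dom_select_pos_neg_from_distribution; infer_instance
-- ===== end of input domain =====

-- B replaces A's deepcopy + descending sort of the remainder + positional comparison
-- by a single reverse pass tracking the suffix maximum (objective: a faster algorithm).

-- ===== PORT A =====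
def sort_hit_list_fixing_pos_index (hit_list : List Int) (pos_index : Int) : List Int :=
  match PySem.List.pop? hit_list pos_index with
  | none => []   -- unreachable: A is always called with pos_index in range
  | some (pos_value, copyed_hit_list) =>
      PySem.List.insert (PySem.List.sorted copyed_hit_list (fun x => x) true) pos_index pos_value

-- A's first for-loop: first i (ascending) with i != pos_index and hit_list[i] != sorted_hit_list[i]
def negSearchA (hit_list sorted_hit_list : List Int) (pos_index : Int) : List Nat → Int
  | [] => -1
  | i :: rest =>
      if (i : Int) ≠ pos_index then
        if PySem.List.pyGet? hit_list (i : Int) ≠ PySem.List.pyGet? sorted_hit_list (i : Int) then (i : Int)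
        else negSearchA hit_list sorted_hit_list pos_index rest
      else negSearchA hit_list sorted_hit_list pos_index rest

-- A's fallback for-loop: first i with i != pos_index
def fallbackA (pos_index : Int) : List Nat → Int
  | [] => -1
  | i :: rest => if (i : Int) ≠ pos_index then (i : Int) else fallbackA pos_index rest

def select_pos_neg_from_distribution (hit_list : List Int) : Int × Int :=
  match PySem.List.max? hit_list (fun x => x) with
  | none => (0, -1)   -- Python: max([]) raises ValueError; excluded by Pre_
  | some max_value =>
    let pos_index : Int := ((PySem.List.index? hit_list max_value).getD 0 : Nat)
    let sorted_hit_list := sort_hit_list_fixing_pos_index hit_list pos_index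
    let neg1 := negSearchA hit_list sorted_hit_list pos_index (List.range hit_list.length)
    let neg_index := if neg1 = -1 then fallbackA pos_index (List.range hit_list.length) else neg1
    (pos_index, neg_index)

-- ===== PORT B =====
-- Source B: pos_index = 0; for i in range(1, n): if hit_list[i] > hit_list[pos_index]: pos_index = i
def posLoopB (hit_list : List Int) : Nat → List Nat → Nat
  | p, [] => p
  | p, i :: rest =>
      if hit_list.getD p 0 < hit_list.getD i 0 then posLoopB hit_list i rest
      else posLoopB hit_list p rest

-- Source B: the reverse pass over range(n-1, -1, -1) with state (suffmax, neg_index)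
def negLoopB (hit_list : List Int) (pos : Nat) : Option Int → Int → List Nat → Int
  | _, neg, [] => neg
  | sm, neg, i :: rest =>
      if i = pos then negLoopB hit_list pos sm neg rest
      else
        let v := hit_list.getD i 0
        match sm with
        | none => negLoopB hit_list pos (some v) neg rest
        | some m =>
          if m < v then negLoopB hit_list pos (some v) neg rest
          else if v < m then negLoopB hit_list pos sm (i : Int) rest
          else negLoopB hit_list pos sm neg rest

def select_pos_neg_from_distribution_alt (hit_list : List Int) : Int × Int :=
  let n := hit_list.length
  let pos_index := posLoopB hit_list 0 (List.range' 1 (n - 1))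
  let neg1 := negLoopB hit_list pos_index none (-1) (List.range n).reverse
  let neg_index := if neg1 = -1 ∧ 1 < n then (if pos_index = 0 then 1 else 0) else neg1
  ((pos_index : Int), neg_index)

-- ===== PRECONDITION & SPEC =====
-- Pre_ excludes only the empty list, on which Python's max([]) raises ValueError.
def Pre_select_pos_neg_from_distribution (hit_list : List Int) : Prop := hit_list ≠ []
instance (hit_list : List Int) : Decidable (Pre_select_pos_neg_from_distribution hit_list) := by unfold Pre_select_pos_neg_from_distribution; infer_instance
def pvWitness_select_pos_neg_from_distribution : List Int := [3, 1, 2]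

def Spec_select_pos_neg_from_distribution (hit_list : List Int) (out : Int × Int) : Prop := out = select_pos_neg_from_distribution_alt hit_list
instance (hit_list : List Int) (out : Int × Int) : Decidable (Spec_select_pos_neg_from_distribution hit_list out) := by unfold Spec_select_pos_neg_from_distribution; infer_instance

-- ===== CLAIM (what is proved, stated in full; the proofs are below) =====
def Claim_equal_select_pos_neg_from_distribution : Prop := ∀ (hit_list : List Int), Dom_select_pos_neg_from_distribution hit_list → Pre_select_pos_neg_from_distribution hit_list → Spec_select_pos_neg_from_distribution hit_list (select_pos_neg_from_distribution hit_list)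

-- ===== LEMMAS AND PROOFS =====

-- Proof-side reference machinery.  g i := hit_list.getD i 0.

/-- max of a list as B's suffix-max state computes it. -/
def maxOf : List Int → Option Int
  | [] => none
  | a :: t => some (match maxOf t with | none => a | some m => max a m)

/-- the values l[k] for t ≤ k < l.length, k ≠ P, in order. -/
def region (l : List Int) (P t : Nat) : List Int :=
  ((List.range' t (l.length - t)).filter (fun k => decide (k ≠ P))).map (fun k => l.getD k 0)

/-- B's violation condition at index i: some later value (excluding P) is larger. -/
def condB (l : List Int) (P i : Nat) : Bool :=
  match maxOf (region l P (i + 1)) with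
  | none => false
  | some m => decide (l.getD i 0 < m)

/-- first index in [s, s+k) (ascending) that is ≠ P and violated; else neg. -/
def ascFind (l : List Int) (P : Nat) : Nat → Nat → Int → Int
  | _, 0, neg => neg
  | s, k+1, neg => if s ≠ P ∧ condB l P s then (s : Int) else ascFind l P (s+1) k neg

/-- P is the first index of the maximum of l. -/
def isFirstMax (l : List Int) (P : Nat) : Prop :=
  P < l.length ∧ (∀ j, j < l.length → l.getD j 0 ≤ l.getD P 0) ∧ (∀ j, j < P → l.getD j 0 < l.getD P 0)

theorem isFirstMax_unique {l : List Int} {P Q : Nat} (hP : isFirstMax l P) (hQ : isFirstMax l Q) : P = Q := by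
  obtain ⟨hPn, hPmax, hPfirst⟩ := hP
  obtain ⟨hQn, hQmax, hQfirst⟩ := hQ
  rcases Nat.lt_trichotomy P Q with h | h | h
  · have h1 := hQfirst P h
    have h2 := hPmax Q hQn
    omega
  · exact h
  · have h1 := hPfirst Q h
    have h2 := hQmax P hPn
    omega

theorem maxOf_mem {xs : List Int} {m : Int} (h : maxOf xs = some m) : m ∈ xs := by
  induction xs with
  | nil => simp [maxOf] at h
  | cons a t ih =>
    simp only [maxOf] at h
    cases hmt : maxOf t with
    | none => simp [hmt] at h; simp [h]
    | some m' =>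
      simp [hmt] at h
      rcases max_choice a m' with hc | hc
      · rw [← h, hc]; exact List.mem_cons_self
      · have hmm : m = m' := by rw [← h, hc]
        subst hmm
        exact List.mem_cons_of_mem _ (ih hmt)

theorem le_maxOf {xs : List Int} {x : Int} (hx : x ∈ xs) : ∃ m, maxOf xs = some m ∧ x ≤ m := by
  induction xs with
  | nil => simp at hx
  | cons a t ih =>
    rcases List.mem_cons.1 hx with rfl | hx
    · refine ⟨_, rfl, ?_⟩
      cases hmt : maxOf t <;> simp
    · obtain ⟨m, hm, hxm⟩ := ih hx
      refine ⟨_, rfl, ?_⟩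
      simp only [hm]
      exact le_max_of_le_right hxm

theorem region_ge_len {l : List Int} {P t : Nat} (h : l.length ≤ t) : region l P t = [] := by
  simp [region, Nat.sub_eq_zero_of_le h]

theorem region_cons {l : List Int} {P t : Nat} (h : t < l.length) :
    region l P t = if t = P then region l P (t+1) else l.getD t 0 :: region l P (t+1) := by
  have hr : List.range' t (l.length - t) = t :: List.range' (t+1) (l.length - (t+1)) := by
    have : l.length - t = (l.length - (t+1)) + 1 := by omega
    rw [this, List.range'_succ]
  rw [region, hr]
  by_cases htP : t = P <;> simp [htP, region]

-- ===== B-side characterisation =====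

theorem ascFind_step (l : List Int) (P : Nat) (s k : Nat) (neg : Int) :
    ascFind l P s (k+1) neg = if s ≠ P ∧ condB l P s = true then (s : Int) else ascFind l P (s+1) k neg := rfl

theorem ascFind_snoc (l : List Int) (P : Nat) : ∀ k s neg,
    ascFind l P s (k+1) neg = ascFind l P s k (if (s+k ≠ P ∧ condB l P (s+k)) then ((s+k : Nat) : Int) else neg) := by
  intro k
  induction k with
  | zero =>
    intro s neg
    rw [ascFind_step]
    simp [ascFind]
  | succ k ih =>
    intro s neg
    conv_lhs => rw [ascFind_step]
    conv_rhs => rw [ascFind_step]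
    by_cases hc : s ≠ P ∧ condB l P s = true
    · rw [if_pos hc, if_pos hc]
    · rw [if_neg hc, if_neg hc, ih (s+1) neg]
      have h1 : s + 1 + k = s + (k+1) := by omega
      rw [h1]

theorem negLoopB_eq_ascFind (l : List Int) (P : Nat) : ∀ k s neg, s + k ≤ l.length →
    negLoopB l P (maxOf (region l P (s+k))) neg ((List.range' s k).reverse) = ascFind l P s k neg := by
  intro k
  induction k with
  | zero =>
    intro s neg h
    simp [negLoopB, ascFind]
  | succ k ih =>
    intro s neg h
    have e : s + (k+1) = s + k + 1 := by omega
    rw [e]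
    have hsk : s + k < l.length := by omega
    have hrev : (List.range' s (k+1)).reverse = (s+k) :: (List.range' s k).reverse := by
      rw [List.range'_concat]
      simp
    rw [hrev, ascFind_snoc]
    by_cases hp : s + k = P
    · have hreg : region l P (s+k) = region l P (s+k+1) := by rw [region_cons hsk, if_pos hp]
      rw [negLoopB, if_pos hp, if_neg (by simp [hp]), ← hreg]
      exact ih s neg (by omega)
    · have hreg : region l P (s+k) = l.getD (s+k) 0 :: region l P (s+k+1) := by
        rw [region_cons hsk, if_neg hp]
      rw [negLoopB, if_neg hp]
      cases hm : maxOf (region l P (s+k+1)) with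
      | none =>
        have hsm : maxOf (region l P (s+k)) = some (l.getD (s+k) 0) := by
          rw [hreg, maxOf, hm]
        have hcond : condB l P (s+k) = false := by rw [condB, hm]
        rw [hcond]
        simp only [Bool.false_eq_true, and_false, if_false]
        rw [← hsm]
        exact ih s neg (by omega)
      | some m =>
        have hsm : maxOf (region l P (s+k)) = some (max (l.getD (s+k) 0) m) := by
          rw [hreg, maxOf, hm]
        simp only
        rcases lt_trichotomy m (l.getD (s+k) 0) with hlt | heq | hgt
        · have hcond : condB l P (s+k) = false := by
            rw [condB, hm]
            show decide (l.getD (s+k) 0 < m) = false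
            simp only [decide_eq_false_iff_not]
            omega
          rw [if_pos hlt, hcond]
          simp only [Bool.false_eq_true, and_false, if_false]
          have : some (l.getD (s+k) 0) = maxOf (region l P (s+k)) := by
            rw [hsm, max_eq_left (by omega)]
          rw [this]
          exact ih s neg (by omega)
        · have hcond : condB l P (s+k) = false := by
            rw [condB, hm]
            show decide (l.getD (s+k) 0 < m) = false
            simp only [decide_eq_false_iff_not]
            omega
          rw [if_neg (by omega), if_neg (by omega), hcond]
          simp only [Bool.false_eq_true, and_false, if_false]
          have : some m = maxOf (region l P (s+k)) := by
            rw [hsm, max_eq_right (by omega)]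
          rw [this]
          exact ih s neg (by omega)
        · have hcond : condB l P (s+k) = true := by
            rw [condB, hm]
            show decide (l.getD (s+k) 0 < m) = true
            simp only [decide_eq_true_eq]
            omega
          rw [if_neg (by omega), if_pos hgt, hcond]
          simp only [ne_eq, hp, not_false_eq_true, and_true, true_and, if_true]
          have : some m = maxOf (region l P (s+k)) := by
            rw [hsm, max_eq_right (by omega)]
          rw [this]
          exact ih s ((s+k : Nat) : Int) (by omega)

theorem B_neg_eq (l : List Int) (P : Nat) (h : P < l.length) :
    negLoopB l P none (-1) (List.range l.length).reverse = ascFind l P 0 l.length (-1) := by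
  have h0 : maxOf (region l P (0 + l.length)) = none := by
    rw [region_ge_len (by omega)]; rfl
  have := negLoopB_eq_ascFind l P l.length 0 (-1) (by omega)
  rw [h0] at this
  simpa [List.range_eq_range'] using this

theorem posLoopB_isFirstMax (l : List Int) : ∀ k s p, s + k = l.length → p < s →
    (∀ j, j < s → l.getD j 0 ≤ l.getD p 0) → (∀ j, j < p → l.getD j 0 < l.getD p 0) →
    isFirstMax l (posLoopB l p (List.range' s k)) := by
  intro k
  induction k with
  | zero =>
    intro s p hsk hps hmax hfirst
    simp only [List.range', posLoopB]
    exact ⟨by omega, fun j hj => hmax j (by omega), hfirst⟩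
  | succ k ih =>
    intro s p hsk hps hmax hfirst
    rw [List.range'_succ]
    rw [posLoopB]
    by_cases hlt : l.getD p 0 < l.getD s 0
    · rw [if_pos hlt]
      refine ih (s+1) s (by omega) (by omega) ?_ ?_
      · intro j hj
        rcases Nat.lt_or_ge j s with h | h
        · exact le_of_lt (lt_of_le_of_lt (hmax j h) hlt)
        · have : j = s := by omega
          simp [this]
      · intro j hj
        exact lt_of_le_of_lt (hmax j hj) hlt
    · rw [if_neg hlt]
      refine ih (s+1) p (by omega) (by omega) ?_ hfirst
      intro j hj
      rcases Nat.lt_or_ge j s with h | h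
      · exact hmax j h
      · have : j = s := by omega
        rw [this]; omega

-- ===== A-side characterisation =====

theorem index?_isFirstMax {l : List Int} {M : Int} {p : Nat}
    (hmax : PySem.List.max? l (fun x => x) = some M)
    (hidx : PySem.List.index? l M = some p) : isFirstMax l p := by
  obtain ⟨hk, hEq, hne⟩ := PySem.List.getElem_of_index?_eq_some hidx
  have hub : ∀ y ∈ l, y ≤ M := fun y hy => PySem.List.max?_isMax hmax y hy
  have hgP : l.getD p 0 = M := by rw [List.getD_eq_getElem l 0 hk, hEq]
  refine ⟨hk, ?_, ?_⟩
  · intro j hj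
    rw [List.getD_eq_getElem l 0 hj, hgP]
    exact hub _ (List.getElem_mem hj)
  · intro j hj
    have hjl : j < l.length := by omega
    rw [List.getD_eq_getElem l 0 hjl, hgP]
    exact lt_of_le_of_ne (hub _ (List.getElem_mem hjl)) (hne j hj)

theorem pvFoldMax_isSome (f : Option Int → Int → Option Int)
    (hf : ∀ a x, (f (some a) x).isSome) : ∀ (t : List Int) (a : Int), (List.foldl f (some a) t).isSome := by
  intro t
  induction t with
  | nil => intro a; simp
  | cons b t ih =>
    intro a
    rw [List.foldl_cons]
    obtain ⟨c, hc⟩ := Option.isSome_iff_exists.1 (hf a b)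
    rw [hc]
    exact ih c

theorem max?_isSome {l : List Int} (h : l ≠ []) : (PySem.List.max? l (fun x => x)).isSome := by
  cases l with
  | nil => simp at h
  | cons a t =>
    simp only [PySem.List.max?]
    refine pvFoldMax_isSome _ ?_ t a
    intro a x
    simp only
    split <;> simp

-- structure of A's sorted_hit_list
theorem sh_struct {l : List Int} {P : Nat} (h : P < l.length) :
    sort_hit_list_fixing_pos_index l (P : Int) =
      (PySem.List.sorted (l.eraseIdx P) (fun x => x) true).take P ++
        l.getD P 0 :: (PySem.List.sorted (l.eraseIdx P) (fun x => x) true).drop P := by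
  rw [sort_hit_list_fixing_pos_index, PySem.List.pop?_natCast l P h]
  show PySem.List.insert (PySem.List.sorted (l.eraseIdx P) (fun x => x) true) (P : Int) (l[P]'h) = _
  have hlen : (PySem.List.sorted (l.eraseIdx P) (fun x => x) true).length = l.length - 1 := by
    rw [PySem.List.length_sorted, List.length_eraseIdx]
    simp [h]
  rw [PySem.List.insert_natCast _ P _ (by omega)]
  rw [List.getD_eq_getElem l 0 h]

-- the sort-vs-suffix-max core, on the remainder list r
theorem mism_core (r : List Int) (j : Nat) (hj : j < r.length)
    (hpre : ∀ j', j' < j → r.getD j' 0 = (PySem.List.sorted r (fun x => x) true).getD j' 0) :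
    (r.getD j 0 = (PySem.List.sorted r (fun x => x) true).getD j 0 ↔
      ∀ x ∈ r.drop (j+1), x ≤ r.getD j 0) := by
  set srt := PySem.List.sorted r (fun x => x) true with hsrt
  have hlen : srt.length = r.length := PySem.List.length_sorted r _ true
  have hjs : j < srt.length := by omega
  have htake : r.take j = srt.take j := by
    apply List.ext_getElem
    · simp [hlen]
    · intro i h1 h2
      have hij : i < j := by simp at h1; omega
      have hir : i < r.length := by omega
      have his : i < srt.length := by omega
      rw [List.getElem_take, List.getElem_take]
      have := hpre i hij
      rwa [List.getD_eq_getElem r 0 hir, List.getD_eq_getElem srt 0 his] at this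
  have hperm : (r.drop j).Perm (srt.drop j) := by
    have hp : r.Perm srt := (PySem.List.sorted_perm r _ true).symm
    have h1 : (r.take j ++ r.drop j).Perm (r.take j ++ srt.drop j) := by
      rw [List.take_append_drop]
      conv_rhs => rw [htake]
      rw [List.take_append_drop]
      exact hp
    exact (List.perm_append_left_iff _).1 h1
  have hpair : List.Pairwise (fun a b => b ≤ a) srt := by
    have := PySem.List.sorted_pairwise_rev r (fun x => x)
    simpa using this
  have hdrop_srt : srt.drop j = srt[j] :: srt.drop (j+1) := List.drop_eq_getElem_cons hjs
  have hpair_drop : List.Pairwise (fun a b : Int => b ≤ a) (srt.drop j) :=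
    List.Pairwise.sublist (List.drop_sublist j srt) hpair
  have hub_srt : ∀ x ∈ srt.drop (j+1), x ≤ srt[j] := by
    rw [hdrop_srt] at hpair_drop
    exact (List.pairwise_cons.1 hpair_drop).1
  have hub_srt' : ∀ x ∈ srt.drop j, x ≤ srt[j] := by
    rw [hdrop_srt]
    intro x hx
    rcases List.mem_cons.1 hx with rfl | hx
    · exact le_refl _
    · exact hub_srt x hx
  have hdrop_r : r.drop j = r[j] :: r.drop (j+1) := List.drop_eq_getElem_cons hj
  rw [List.getD_eq_getElem r 0 hj, List.getD_eq_getElem srt 0 hjs]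
  constructor
  · intro hEq x hx
    have hperm' := hperm
    rw [hdrop_r, hdrop_srt, hEq] at hperm'
    have htail := (List.perm_cons _).1 hperm'
    rw [hEq]
    exact hub_srt x (htail.mem_iff.1 hx)
  · intro hub
    have hub_r : ∀ x ∈ r.drop j, x ≤ r[j] := by
      rw [hdrop_r]
      intro x hx
      rcases List.mem_cons.1 hx with rfl | hx
      · exact le_refl _
      · exact hub x hx
    have h1 : srt[j] ≤ r[j] := by
      apply hub_r
      apply hperm.symm.mem_iff.1
      rw [hdrop_srt]
      exact List.mem_cons_self
    have h2 : r[j] ≤ srt[j] := by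
      apply hub_srt'
      apply hperm.mem_iff.1
      rw [hdrop_r]
      exact List.mem_cons_self
    omega

-- index map from hit_list indices (≠ P) to indices of the remainder l.eraseIdx P
def pvPhi (P i : Nat) : Nat := if i < P then i else i - 1

theorem maxOf_eq_none {xs : List Int} (h : maxOf xs = none) : xs = [] := by
  cases xs with
  | nil => rfl
  | cons a t => simp [maxOf] at h

theorem condB_iff (l : List Int) (P s : Nat) :
    condB l P s = true ↔ ¬ (∀ x ∈ region l P (s+1), x ≤ l.getD s 0) := by
  rw [condB]
  cases hm : maxOf (region l P (s+1)) with
  | none =>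
    have : region l P (s+1) = [] := maxOf_eq_none hm
    simp [this]
  | some m =>
    have hmem : m ∈ region l P (s+1) := maxOf_mem hm
    simp only [decide_eq_true_eq]
    constructor
    · intro hlt hall
      exact absurd (hall m hmem) (by omega)
    · intro hnall
      by_contra hc
      apply hnall
      intro x hx
      obtain ⟨m', hm', hxm⟩ := le_maxOf hx
      rw [hm] at hm'
      cases hm'
      omega

theorem mapGetD2 (l : List Int) : ∀ (t c : Nat), t + c ≤ l.length →
    (List.range' t c).map (fun k => l.getD k 0) = (l.drop t).take c := by
  intro t c h
  apply List.ext_getElem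
  · simp
    omega
  · intro i h1 h2
    simp only [List.getElem_map, List.getElem_range']
    rw [List.getElem_take, List.getElem_drop]
    have : t + 1 * i < l.length := by
      simp at h1
      omega
    rw [List.getD_eq_getElem l 0 this]
    congr 1
    omega

theorem T1 (l : List Int) (P : Nat) (hP : P < l.length) (i : Nat) (hi : i < l.length) (hiP : i ≠ P) :
    l.getD i 0 = (l.eraseIdx P).getD (pvPhi P i) 0 := by
  have hrl : (l.eraseIdx P).length = l.length - 1 := by
    rw [List.length_eraseIdx]
    simp [hP]
  rcases Nat.lt_or_ge i P with h | h
  · have h1 : pvPhi P i = i := by simp [pvPhi, h]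
    have h2 : i < (l.eraseIdx P).length := by omega
    rw [h1, List.getD_eq_getElem _ 0 h2, List.getElem_eraseIdx, dif_pos h,
      List.getD_eq_getElem l 0 hi]
  · have hPi : P < i := by omega
    have h1 : pvPhi P i = i - 1 := by simp [pvPhi]; omega
    have h2 : i - 1 < (l.eraseIdx P).length := by omega
    rw [h1, List.getD_eq_getElem _ 0 h2, List.getElem_eraseIdx, dif_neg (by omega),
      List.getD_eq_getElem l 0 hi]
    congr 1
    omega

theorem T2 (l : List Int) (P : Nat) (hP : P < l.length) (i : Nat) (hi : i < l.length) (hiP : i ≠ P) :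
    (sort_hit_list_fixing_pos_index l (P : Int)).getD i 0 =
      (PySem.List.sorted (l.eraseIdx P) (fun x => x) true).getD (pvPhi P i) 0 := by
  set srt := PySem.List.sorted (l.eraseIdx P) (fun x => x) true with hsrt
  have hrl : srt.length = l.length - 1 := by
    rw [hsrt, PySem.List.length_sorted, List.length_eraseIdx]
    simp [hP]
  have htl : (srt.take P).length = P := by
    rw [List.length_take]
    omega
  rw [sh_struct hP, ← hsrt]
  rcases Nat.lt_or_ge i P with h | h
  · have h1 : pvPhi P i = i := by simp [pvPhi, h]
    have h2 : i < (srt.take P ++ l.getD P 0 :: srt.drop P).length := by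
      simp
      omega
    have h3 : i < srt.length := by omega
    rw [h1, List.getD_eq_getElem _ 0 h2, List.getElem_append_left (by omega),
      List.getElem_take, List.getD_eq_getElem srt 0 h3]
  · have hPi : P < i := by omega
    have h1 : pvPhi P i = i - 1 := by simp [pvPhi]; omega
    have h2 : i < (srt.take P ++ l.getD P 0 :: srt.drop P).length := by
      simp
      omega
    have h3 : i - 1 < srt.length := by omega
    rw [h1, List.getD_eq_getElem _ 0 h2, List.getElem_append_right (by omega)]
    have h4 : i - (List.take P srt).length = (i - P - 1) + 1 := by
      rw [htl]
      omega
    simp only [h4, List.getElem_cons_succ]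
    rw [List.getElem_drop, List.getD_eq_getElem srt 0 h3]
    congr 1
    omega

theorem T3 (l : List Int) (P : Nat) (hP : P < l.length) (i : Nat) (hi : i < l.length) (hiP : i ≠ P) :
    region l P (i+1) = (l.eraseIdx P).drop (pvPhi P i + 1) := by
  have hPle : P ≤ l.length := by omega
  have htlen : (List.take P l).length = P := by
    rw [List.length_take]
    omega
  rcases Nat.lt_or_ge i P with h | h
  · -- i < P
    have h1 : pvPhi P i = i := by simp [pvPhi, h]
    rw [h1, region]
    have hsplit : List.range' (i+1) (l.length - (i+1)) =
        List.range' (i+1) (P - i - 1) ++ (P :: List.range' (P+1) (l.length - P - 1)) := by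
      have e1 : P :: List.range' (P+1) (l.length - P - 1) = List.range' P (l.length - P) := by
        have h' : l.length - P = (l.length - P - 1) + 1 := by omega
        conv_rhs => rw [h']
        rw [List.range'_succ]
      rw [e1]
      have e2 : l.length - (i+1) = (P - i - 1) + (l.length - P) := by omega
      rw [e2, ← List.range'_append]
      congr 2
      omega
    rw [hsplit, List.filter_append, List.map_append]
    have hf1 : List.filter (fun k => decide (k ≠ P)) (List.range' (i+1) (P - i - 1)) =
        List.range' (i+1) (P - i - 1) := by
      rw [List.filter_eq_self]
      intro a ha
      rw [List.mem_range'] at ha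
      simp
      omega
    have hf2 : List.filter (fun k => decide (k ≠ P)) (P :: List.range' (P+1) (l.length - P - 1)) =
        List.range' (P+1) (l.length - P - 1) := by
      rw [List.filter_cons]
      simp only [decide_not, ne_eq, not_true_eq_false, decide_false, Bool.not_true]
      rw [if_neg (by simp), List.filter_eq_self.2]
      intro a ha
      rw [List.mem_range'] at ha
      simp
      omega
    rw [hf1, hf2, mapGetD2 l (i+1) (P - i - 1) (by omega), mapGetD2 l (P+1) (l.length - P - 1) (by omega)]
    rw [List.eraseIdx_eq_take_drop_succ, List.drop_append, htlen, List.drop_take]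
    have e3 : i + 1 - P = 0 := by omega
    rw [e3, List.drop_zero]
    have e4 : P - i - 1 = P - (i+1) := by omega
    rw [e4]
    congr 1
    apply List.take_of_length_le
    rw [List.length_drop]
    omega
  · -- i > P
    have hPi : P < i := by omega
    have h1 : pvPhi P i = i - 1 := by simp [pvPhi]; omega
    rw [h1, region]
    have hf : List.filter (fun k => decide (k ≠ P)) (List.range' (i+1) (l.length - (i+1))) =
        List.range' (i+1) (l.length - (i+1)) := by
      rw [List.filter_eq_self]
      intro a ha
      rw [List.mem_range'] at ha
      simp
      omega
    rw [hf, mapGetD2 l (i+1) (l.length - (i+1)) (by omega)]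
    rw [List.eraseIdx_eq_take_drop_succ, List.drop_append, htlen]
    have e1 : i - 1 + 1 = i := by omega
    rw [e1]
    have e2 : (List.take P l).drop i = [] := by
      apply List.drop_eq_nil_of_le
      omega
    rw [e2, List.drop_drop, List.nil_append]
    have e3 : P + 1 + (i - P) = i + 1 := by omega
    rw [e3]
    apply List.take_of_length_le
    rw [List.length_drop]

theorem sh_length {l : List Int} {P : Nat} (hP : P < l.length) :
    (sort_hit_list_fixing_pos_index l (P : Int)).length = l.length := by
  rw [sh_struct hP]
  simp [PySem.List.length_sorted, List.length_eraseIdx, hP]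
  omega

theorem pre_transfer (l : List Int) (P : Nat) (hP : P < l.length) (s : Nat) (hs : s < l.length) (hsP : s ≠ P)
    (hpre : ∀ i, i < s → i ≠ P → l.getD i 0 = (sort_hit_list_fixing_pos_index l (P : Int)).getD i 0) :
    ∀ j', j' < pvPhi P s →
      (l.eraseIdx P).getD j' 0 = (PySem.List.sorted (l.eraseIdx P) (fun x => x) true).getD j' 0 := by
  intro j' hj'
  have hphis : pvPhi P s ≤ s := by
    rw [pvPhi]
    split <;> omega
  rcases Nat.lt_or_ge j' P with h | h
  · have h1 : pvPhi P j' = j' := by simp [pvPhi, h]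
    have h2 : j' < s := by omega
    have h3 : j' ≠ P := by omega
    have h4 : j' < l.length := by omega
    rw [← h1, ← T1 l P hP j' h4 h3, ← T2 l P hP j' h4 h3]
    exact hpre j' h2 h3
  · have hsgt : P < s := by
      by_contra hc
      have : s < P := by omega
      rw [pvPhi, if_pos this] at hj'
      omega
    have hphi : pvPhi P s = s - 1 := by
      rw [pvPhi, if_neg (by omega)]
    have h2 : j' + 1 < s := by omega
    have h3 : j' + 1 ≠ P := by omega
    have h4 : j' + 1 < l.length := by omega
    have h1 : pvPhi P (j' + 1) = j' := by
      rw [pvPhi, if_neg (by omega)]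
      omega
    rw [← h1, ← T1 l P hP (j'+1) h4 h3, ← T2 l P hP (j'+1) h4 h3]
    exact hpre (j'+1) h2 h3

theorem mism_bridge (l : List Int) (P : Nat) (hP : P < l.length) (s : Nat) (hs : s < l.length) (hsP : s ≠ P)
    (hpre : ∀ i, i < s → i ≠ P → l.getD i 0 = (sort_hit_list_fixing_pos_index l (P : Int)).getD i 0) :
    ((l.getD s 0 ≠ (sort_hit_list_fixing_pos_index l (P : Int)).getD s 0) ↔ condB l P s = true) := by
  have hrl : (l.eraseIdx P).length = l.length - 1 := by
    rw [List.length_eraseIdx]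
    simp [hP]
  have hphil : pvPhi P s < (l.eraseIdx P).length := by
    rw [pvPhi]
    split <;> omega
  have hcore := mism_core (l.eraseIdx P) (pvPhi P s) hphil (pre_transfer l P hP s hs hsP hpre)
  rw [condB_iff, T3 l P hP s hs hsP, T2 l P hP s hs hsP, T1 l P hP s hs hsP]
  exact not_congr hcore

theorem negSearchA_eq_ascFind (l : List Int) (P : Nat) (hfm : isFirstMax l P) :
    ∀ k s, s + k = l.length →
    (∀ i, i < s → i ≠ P → l.getD i 0 = (sort_hit_list_fixing_pos_index l (P : Int)).getD i 0) →
    negSearchA l (sort_hit_list_fixing_pos_index l (P : Int)) (P : Int) (List.range' s k) =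
      ascFind l P s k (-1) := by
  have hP : P < l.length := hfm.1
  intro k
  induction k with
  | zero =>
    intro s hsk hpre
    simp [negSearchA, ascFind, List.range']
  | succ k ih =>
    intro s hsk hpre
    have hs : s < l.length := by omega
    rw [List.range'_succ, negSearchA, ascFind_step]
    by_cases hsP : s = P
    · rw [if_neg (by simp [hsP]), if_neg (by simp [hsP])]
      refine ih (s+1) (by omega) ?_
      intro i hi hiP
      rcases Nat.lt_or_ge i s with h | h
      · exact hpre i h hiP
      · have : i = s := by omega
        rw [this] at hiP
        exact absurd hsP hiP
    · have hcast : (s : Int) ≠ (P : Int) := by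
        simp
        omega
      rw [if_pos hcast]
      have hget : PySem.List.pyGet? l (s : Int) = some (l.getD s 0) := by
        rw [PySem.List.pyGet?_natCast, List.getElem?_eq_getElem hs, List.getD_eq_getElem l 0 hs]
      have hshl : s < (sort_hit_list_fixing_pos_index l (P : Int)).length := by
        rw [sh_length hP]
        exact hs
      have hgetsh : PySem.List.pyGet? (sort_hit_list_fixing_pos_index l (P : Int)) (s : Int) =
          some ((sort_hit_list_fixing_pos_index l (P : Int)).getD s 0) := by
        rw [PySem.List.pyGet?_natCast, List.getElem?_eq_getElem hshl,
          List.getD_eq_getElem _ 0 hshl]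
      rw [hget, hgetsh]
      by_cases hc : l.getD s 0 = (sort_hit_list_fixing_pos_index l (P : Int)).getD s 0
      · have hcond : condB l P s ≠ true := by
          intro ht
          exact absurd hc (((mism_bridge l P hP s hs hsP hpre).2 ht))
        rw [if_neg (by simp only [ne_eq, Option.some.injEq, not_not]; exact hc),
          if_neg (fun h => hcond h.2)]
        refine ih (s+1) (by omega) ?_
        intro i hi hiP
        rcases Nat.lt_or_ge i s with h | h
        · exact hpre i h hiP
        · have : i = s := by omega
          rw [this]
          exact hc
      · have hcond : condB l P s = true := (mism_bridge l P hP s hs hsP hpre).1 hc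
        rw [if_pos (by simp only [ne_eq, Option.some.injEq]; exact hc), if_pos ⟨hsP, hcond⟩]

theorem fallbackA_eval (l : List Int) (P : Nat) (hn : l ≠ []) (hP : P < l.length) :
    fallbackA (P : Int) (List.range l.length) =
      if 1 < l.length then (if P = 0 then 1 else 0) else -1 := by
  have hn1 : 1 ≤ l.length := by
    cases l with
    | nil => simp at hn
    | cons a t => simp
  rcases Nat.lt_or_ge 1 l.length with h1 | h1
  · rw [if_pos h1]
    have : List.range l.length = 0 :: 1 :: List.range' 2 (l.length - 2) := by
      rw [List.range_eq_range']
      have h2 : l.length = (l.length - 2) + 1 + 1 := by omega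
      rw [h2, List.range'_succ, List.range'_succ]
      norm_num
      omega
    rw [this, fallbackA]
    by_cases hP0 : P = 0
    · simp only [hP0]
      rw [if_neg (by simp), fallbackA, if_pos (by simp)]
      rfl
    · rw [if_pos (by simp; omega), if_neg hP0]
      rfl
  · rw [if_neg (by omega)]
    have hl1 : l.length = 1 := by omega
    have hP0 : P = 0 := by omega
    rw [hl1, hP0]
    have : List.range 1 = [0] := rfl
    rw [this, fallbackA]
    norm_num
    rfl

-- ===== VERDICT (by name: the statement is the Claim_ definition above) =====
theorem select_pos_neg_from_distribution_spec : Claim_equal_select_pos_neg_from_distribution := by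
  intro l _hdom hpre
  rw [Spec_select_pos_neg_from_distribution]
  have hne : l ≠ [] := hpre
  have hn1 : 1 ≤ l.length := by
    cases l with
    | nil => exact absurd rfl hne
    | cons a t => simp
  obtain ⟨M, hM⟩ := Option.isSome_iff_exists.1 (max?_isSome hne)
  have hMem : M ∈ l := PySem.List.max?_mem hM
  have hidxs : (PySem.List.index? l M).isSome := (PySem.List.index?_isSome_iff l M).2 hMem
  obtain ⟨p, hp⟩ := Option.isSome_iff_exists.1 hidxs
  have hfmA : isFirstMax l p := index?_isFirstMax hM hp
  have hP : p < l.length := hfmA.1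
  have hfmB : isFirstMax l (posLoopB l 0 (List.range' 1 (l.length - 1))) := by
    refine posLoopB_isFirstMax l (l.length - 1) 1 0 (by omega) (by omega) ?_ ?_
    · intro j hj
      have : j = 0 := by omega
      rw [this]
    · intro j hj
      omega
  have hposB : posLoopB l 0 (List.range' 1 (l.length - 1)) = p := isFirstMax_unique hfmB hfmA
  have hnegA : negSearchA l (sort_hit_list_fixing_pos_index l (p : Int)) (p : Int) (List.range l.length) = ascFind l p 0 l.length (-1) := by
    rw [List.range_eq_range']
    refine negSearchA_eq_ascFind l p hfmA l.length 0 (by omega) ?_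
    intro i hi
    omega
  have hnegB : negLoopB l p none (-1) (List.range l.length).reverse = ascFind l p 0 l.length (-1) :=
    B_neg_eq l p hP
  rw [select_pos_neg_from_distribution, select_pos_neg_from_distribution_alt, hM]
  simp only [hp, Option.getD_some, hposB, hnegA, hnegB]
  rw [fallbackA_eval l p hne hP]
  by_cases h1 : ascFind l p 0 l.length (-1) = -1
  · by_cases h2 : 1 < l.length
    · simp [h1, h2]
    · simp [h1, h2]
  · simp [h1]
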